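-- pv_equiv track=rewrite | github.com/domingoUnican/CostasArrays | BruteForce.py | isCostas
-- ===== SOURCE A (Python) =====
-- def isCostas(a):
--     for d in range(1, len(a) - 1):
--         elements = set()
--         for d_i, d_j in zip(a, a[d:]):
--             if (d_i - d_j) in elements:
--                 return False
--             elements.add(d_i - d_j)
--     return True
-- ===== SOURCE B (Python) =====
-- def isCostas(a):
--     # One pass over all index pairs i < j, accumulating displacement
--     # vectors (j - i, a[j] - a[i]) in a single set; a repeated vector
--     # means the array is not Costas.
--     n = len(a)
--     seen = set()
--     for i in range(n):
--         for j in range(i + 1, n):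
--             v = (j - i, a[j] - a[i])
--             if v in seen:
--                 return False
--             seen.add(v)
--     return True
-- ===== Notes on version B (the rewrite author's own statement) =====
-- stated objective: alternative
-- what changed: Replaces A's outer loop over distances d with fresh per-distance sets by a single pass over all index pairs i<j that accumulates composite displacement vectors (j-i, a[j]-a[i]) in one set; the composite key makes cross-distance collisions impossible, and the extra distance d=n-1 (skipped by A) contributes only one vector so it can never repeat.
import Mathlib
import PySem

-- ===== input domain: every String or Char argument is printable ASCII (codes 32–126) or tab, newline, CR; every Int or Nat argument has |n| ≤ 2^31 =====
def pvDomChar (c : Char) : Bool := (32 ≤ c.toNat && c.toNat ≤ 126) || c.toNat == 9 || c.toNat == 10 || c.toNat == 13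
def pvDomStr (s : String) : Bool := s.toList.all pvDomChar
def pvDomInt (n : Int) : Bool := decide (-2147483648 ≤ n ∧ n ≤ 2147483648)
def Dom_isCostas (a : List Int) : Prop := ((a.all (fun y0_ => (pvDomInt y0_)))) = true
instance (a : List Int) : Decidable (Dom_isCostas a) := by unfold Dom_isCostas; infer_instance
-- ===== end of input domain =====

-- B replaces A's per-distance rescans (a fresh set for each d) by one pass over all
-- index pairs i<j accumulating composite vectors (j-i, a[j]-a[i]) in a single set.

-- ===== PORT A =====
-- inner loop: 'for d_i, d_j in zip(a, a[d:]): …' with early return False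
def costasInner : List (Int × Int) → PySem.Set Int → Bool
  | [], _ => true
  | (di, dj) :: rest, elements =>
    if (di - dj) ∈ elements then false
    else costasInner rest (PySem.Set.add elements (di - dj))

-- outer loop: 'for d in range(1, len(a) - 1): …'
def costasOuter (a : List Int) : List Int → Bool
  | [] => true
  | d :: ds =>
    if costasInner (a.zip (PySem.List.slice a (some d) none)) PySem.Set.empty
    then costasOuter a ds
    else false

def isCostas (a : List Int) : Bool :=
  costasOuter a (PySem.List.pyRange 1 ((a.length : Int) - 1) 1)

-- ===== PORT B =====
-- inner loop: 'for j in range(i + 1, n): …'; indices i, j are always in range,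
-- so a[j] is ported as pyGetD a j 0. 'none' signals the early 'return False'.
def altInner (a : List Int) (i : Int) :
    List Int → PySem.Set (Int × Int) → Option (PySem.Set (Int × Int))
  | [], seen => some seen
  | j :: js, seen =>
    let v : Int × Int := (j - i, PySem.List.pyGetD a j 0 - PySem.List.pyGetD a i 0)
    if v ∈ seen then none
    else altInner a i js (PySem.Set.add seen v)

-- outer loop: 'for i in range(n): …'
def altOuter (a : List Int) (n : Int) :
    List Int → PySem.Set (Int × Int) → Bool
  | [], _ => true
  | i :: rest, seen =>
    match altInner a i (PySem.List.pyRange (i + 1) n 1) seen with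
    | none => false
    | some seen' => altOuter a n rest seen'

def isCostas_alt (a : List Int) : Bool :=
  altOuter a (a.length : Int) (PySem.List.pyRange 0 (a.length : Int) 1) PySem.Set.empty

-- ===== PRECONDITION & SPEC =====
def Spec_isCostas (a : List Int) (out : Bool) : Prop := out = isCostas_alt a
instance (a : List Int) (out : Bool) : Decidable (Spec_isCostas a out) := by unfold Spec_isCostas; infer_instance

-- ===== CLAIM (what is proved, stated in full; the proofs are below) =====
def Claim_equal_isCostas : Prop := ∀ (a : List Int), Dom_isCostas a → Spec_isCostas a (isCostas a)

-- ===== LEMMAS AND PROOFS =====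

-- value of a at an Int index (total form; all indices used are in range)
def gAt (a : List Int) (i : Int) : Int := PySem.List.pyGetD a i 0

-- the vector B stores for the pair (i, j)
def keyAt (a : List Int) (i j : Int) : Int × Int := (j - i, gAt a j - gAt a i)

-- generic "scan for a duplicate" loop over a list of keys
def nscan {α : Type} [BEq α] [LawfulBEq α] [DecidableEq α] :
    List α → PySem.Set α → Option (PySem.Set α)
  | [], s => some s
  | k :: ks, s => if k ∈ s then none else nscan ks (PySem.Set.add s k)

theorem nscan_isSome {α : Type} [BEq α] [LawfulBEq α] [DecidableEq α]
    (ks : List α) (s : PySem.Set α) :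
    (nscan ks s).isSome = true ↔ ks.Nodup ∧ ∀ k ∈ ks, k ∉ s := by
  induction ks generalizing s with
  | nil => simp [nscan]
  | cons k ks ih =>
    by_cases hk : k ∈ s
    · simp [nscan, hk]
    · simp only [nscan, if_neg hk, ih, PySem.Set.mem_add, List.nodup_cons,
        List.mem_cons]
      constructor
      · rintro ⟨hnd, hdisj⟩
        refine ⟨⟨fun hmem => ?_, hnd⟩, ?_⟩
        · exact (hdisj k hmem) (Or.inr rfl)
        · rintro x (rfl | hx)
          · exact hk
          · intro hxs; exact (hdisj x hx) (Or.inl hxs)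
      · rintro ⟨⟨hkks, hnd⟩, hdisj⟩
        refine ⟨hnd, fun x hx => ?_⟩
        rintro (hxs | rfl)
        · exact hdisj x (Or.inr hx) hxs
        · exact hkks hx

theorem nscan_append {α : Type} [BEq α] [LawfulBEq α] [DecidableEq α]
    (l1 l2 : List α) (s : PySem.Set α) :
    nscan (l1 ++ l2) s = (nscan l1 s).bind (nscan l2) := by
  induction l1 generalizing s with
  | nil => simp [nscan]
  | cons k l1 ih =>
    by_cases hk : k ∈ s <;> simp [nscan, hk, ih]

theorem altInner_eq_nscan (a : List Int) (i : Int) (js : List Int)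
    (seen : PySem.Set (Int × Int)) :
    altInner a i js seen = nscan (js.map (keyAt a i)) seen := by
  induction js generalizing seen with
  | nil => rfl
  | cons j js ih => simp [altInner, nscan, keyAt, gAt, ih]

-- B's whole computation is one duplicate scan over all keys, grouped by i
theorem altOuter_eq_nscan (a : List Int) (n : Int) (is_ : List Int)
    (seen : PySem.Set (Int × Int)) :
    altOuter a n is_ seen =
      (nscan (is_.flatMap (fun i => (PySem.List.pyRange (i + 1) n 1).map (keyAt a i))) seen).isSome := by
  induction is_ generalizing seen with
  | nil => rfl
  | cons i rest ih =>
    simp only [altOuter, altInner_eq_nscan, List.flatMap_cons, nscan_append]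
    cases h : nscan ((PySem.List.pyRange (i + 1) n 1).map (keyAt a i)) seen with
    | none => simp
    | some seen' => simpa using ih seen'

-- Nodup as a statement about positions
theorem nodup_iff_getElem (l : List Int) :
    l.Nodup ↔ ∀ (i j : Nat) (_hi : i < l.length) (_hj : j < l.length), i < j → l[i] ≠ l[j] :=
  List.pairwise_iff_getElem

-- each inner key list of B is duplicate-free (first components differ)
theorem inner_keys_nodup (a : List Int) (i n : Int) :
    ((PySem.List.pyRange (i + 1) n 1).map (keyAt a i)).Nodup := by
  refine List.Nodup.map_on ?_ (PySem.List.nodup_pyRange_one _ _)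
  intro x _ y _ hxy
  have h1 : x - i = y - i := congrArg Prod.fst hxy
  omega

-- characterisation of B
theorem isCostas_alt_iff (a : List Int) :
    isCostas_alt a = true ↔
      ∀ i1 i2 j1 j2 : Int, 0 ≤ i1 → i1 < i2 → i2 < (a.length : Int) → i1 < j1 → j1 < (a.length : Int) →
        i2 < j2 → j2 < (a.length : Int) → keyAt a i1 j1 ≠ keyAt a i2 j2 := by
  rw [isCostas_alt, altOuter_eq_nscan, nscan_isSome, List.nodup_flatMap]
  have hempty : ∀ k : Int × Int,
      k ∉ (PySem.Set.empty : PySem.Set (Int × Int)) := by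
    intro k; simp [PySem.Set.empty]
  constructor
  · rintro ⟨⟨_, hpair⟩, -⟩
    rw [List.pairwise_iff_getElem] at hpair
    intro i1 i2 j1 j2 h0 h12 h2n hj1 hj1n hj2 hj2n heq
    have hlen : (PySem.List.pyRange 0 (a.length : Int) 1).length = a.length := by
      simp [PySem.List.length_pyRange_one]
    have hk1 : i1.toNat < a.length := by omega
    have hk2 : i2.toNat < a.length := by omega
    have hd := hpair i1.toNat i2.toNat (by omega) (by omega) (by omega)
    simp only [Function.onFun] at hd
    have e1 : (PySem.List.pyRange 0 (a.length : Int) 1)[i1.toNat]'(by omega) = i1 := by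
      rw [PySem.List.getElem_pyRange_one]; omega
    have e2 : (PySem.List.pyRange 0 (a.length : Int) 1)[i2.toNat]'(by omega) = i2 := by
      rw [PySem.List.getElem_pyRange_one]; omega
    rw [e1, e2] at hd
    rw [List.disjoint_left] at hd
    refine hd (a := keyAt a i1 j1) ?_ ?_
    · exact List.mem_map_of_mem (PySem.List.mem_pyRange_one.mpr ⟨by omega, hj1n⟩)
    · rw [heq]
      exact List.mem_map_of_mem (PySem.List.mem_pyRange_one.mpr ⟨by omega, hj2n⟩)
  · intro h
    refine ⟨⟨fun i _ => inner_keys_nodup a i _, ?_⟩, fun k hk => hempty k⟩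
    rw [List.pairwise_iff_getElem]
    intro k l hk hl hkl
    rw [Function.onFun, List.disjoint_left]
    rw [PySem.List.length_pyRange_one] at hk hl
    rw [PySem.List.getElem_pyRange_one _ _ k (by simp [PySem.List.length_pyRange_one]; omega),
        PySem.List.getElem_pyRange_one _ _ l (by simp [PySem.List.length_pyRange_one]; omega)]
    rintro x hx1 hx2
    obtain ⟨j1, hj1, rfl⟩ := List.mem_map.mp hx1
    obtain ⟨j2, hj2, he⟩ := List.mem_map.mp hx2
    rw [PySem.List.mem_pyRange_one] at hj1 hj2
    exact h (0 + (k : Int)) (0 + (l : Int)) j1 j2 (by omega) (by omega) (by omega)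
      (by omega) (by omega) (by omega) (by omega) he.symm

-- the inner 'for d_i, d_j' loop succeeds iff the difference list has no duplicate
theorem costasInner_iff (ps : List (Int × Int)) (s : PySem.Set Int) :
    costasInner ps s = true ↔
      (ps.map (fun p => p.1 - p.2)).Nodup ∧ ∀ k ∈ ps.map (fun p => p.1 - p.2), k ∉ s := by
  induction ps generalizing s with
  | nil => simp [costasInner]
  | cons p ps ih =>
    obtain ⟨di, dj⟩ := p
    by_cases hk : (di - dj) ∈ s
    · simp [costasInner, hk]
    · simp only [costasInner, if_neg hk, ih, PySem.Set.mem_add, List.map_cons,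
        List.nodup_cons, List.mem_cons]
      constructor
      · rintro ⟨hnd, hdisj⟩
        refine ⟨⟨fun hmem => (hdisj _ hmem) (Or.inr rfl), hnd⟩, ?_⟩
        rintro x (rfl | hx)
        · exact hk
        · intro hxs; exact (hdisj x hx) (Or.inl hxs)
      · rintro ⟨⟨hkks, hnd⟩, hdisj⟩
        refine ⟨hnd, fun x hx => ?_⟩
        rintro (hxs | rfl)
        · exact hdisj x (Or.inr hx) hxs
        · exact hkks hx

-- outer loop of A succeeds iff every inner pass does
theorem costasOuter_iff (a : List Int) (ds : List Int) :
    costasOuter a ds = true ↔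
      ∀ d ∈ ds, costasInner (a.zip (PySem.List.slice a (some d) none)) PySem.Set.empty = true := by
  induction ds with
  | nil => simp [costasOuter]
  | cons d ds ih =>
    rw [show costasOuter a (d :: ds) =
        (if costasInner (a.zip (PySem.List.slice a (some d) none)) PySem.Set.empty
         then costasOuter a ds else false) from rfl]
    by_cases hd : costasInner (a.zip (PySem.List.slice a (some d) none)) PySem.Set.empty = true
    · rw [if_pos hd, ih]
      constructor
      · intro h d' hd'
        rcases List.mem_cons.mp hd' with rfl | hmem
        · exact hd
        · exact h d' hmem
      · intro h d' hd'
        exact h d' (List.mem_cons_of_mem _ hd')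
    · rw [if_neg hd]
      simp only [Bool.false_eq_true, false_iff]
      intro h
      exact hd (h d List.mem_cons_self)

-- one inner pass of A, expressed over positions
theorem zipDiff_nodup_iff (a : List Int) (m : Nat) :
    ((a.zip (a.drop m)).map (fun p => p.1 - p.2)).Nodup ↔
      ∀ i j : Nat, i < j → j + m < a.length →
        a.getD i 0 - a.getD (i + m) 0 ≠ a.getD j 0 - a.getD (j + m) 0 := by
  have hlen : ((a.zip (a.drop m)).map (fun p => p.1 - p.2)).length = a.length - m := by
    simp [List.length_zip]
  have hget : ∀ (k : Nat) (hk : k < ((a.zip (a.drop m)).map (fun p => p.1 - p.2)).length),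
      ((a.zip (a.drop m)).map (fun p => p.1 - p.2))[k] = a.getD k 0 - a.getD (k + m) 0 := by
    intro k hk
    have hk' : k < a.length - m := by omega
    simp only [List.getElem_map, List.getElem_zip, List.getElem_drop]
    rw [List.getD_eq_getElem a 0 (by omega), List.getD_eq_getElem a 0 (by omega)]
    congr 2
    omega
  rw [nodup_iff_getElem]
  constructor
  · intro h i j hij hjm
    have hi : i < ((a.zip (a.drop m)).map (fun p => p.1 - p.2)).length := by omega
    have hj : j < ((a.zip (a.drop m)).map (fun p => p.1 - p.2)).length := by omega
    have := h i j hi hj hij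
    rwa [hget i hi, hget j hj] at this
  · intro h i j hi hj hij
    rw [hget i hi, hget j hj]
    exact h i j hij (by omega)

-- characterisation of A
theorem isCostas_iff (a : List Int) :
    isCostas a = true ↔
      ∀ d : Int, 1 ≤ d → d < (a.length : Int) - 1 →
        ∀ i j : Nat, i < j → (j : Int) + d < (a.length : Int) →
          a.getD i 0 - a.getD (i + d.toNat) 0 ≠ a.getD j 0 - a.getD (j + d.toNat) 0 := by
  rw [isCostas, costasOuter_iff]
  have hmem : ∀ d : Int, d ∈ PySem.List.pyRange 1 ((a.length : Int) - 1) 1 ↔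
      1 ≤ d ∧ d < (a.length : Int) - 1 := fun d => PySem.List.mem_pyRange_one
  constructor
  · intro h d h1 h2 i j hij hjm
    have hd := h d ((hmem d).mpr ⟨h1, h2⟩)
    rw [costasInner_iff, PySem.List.slice_from a (by omega)] at hd
    have := (zipDiff_nodup_iff a d.toNat).mp hd.1 i j hij (by omega)
    exact this
  · intro h d hd
    rw [hmem] at hd
    rw [costasInner_iff, PySem.List.slice_from a (by omega : (0:Int) ≤ d)]
    refine ⟨(zipDiff_nodup_iff a d.toNat).mpr ?_, by simp [PySem.Set.empty]⟩
    intro i j hij hjm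
    exact h d hd.1 hd.2 i j hij (by omega)

-- ===== VERDICT (by name: the statement is the Claim_ definition above) =====
-- the two characterisations describe the same condition
theorem conditions_agree (a : List Int) : isCostas a = isCostas_alt a := by
  by_cases hB : isCostas_alt a = true
  · rw [hB]
    rw [isCostas_iff]
    rw [isCostas_alt_iff] at hB
    intro d h1 h2 i j hij hjm heq
    refine hB (i : Int) (j : Int) ((i : Int) + d) ((j : Int) + d)
      (by omega) (by omega) (by omega) (by omega) (by omega) (by omega) (by omega) ?_
    have e1 : gAt a (i : Int) = a.getD i 0 := PySem.List.pyGetD_natCast a i 0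
    have e2 : gAt a (j : Int) = a.getD j 0 := PySem.List.pyGetD_natCast a j 0
    have e3 : gAt a ((i : Int) + d) = a.getD (i + d.toNat) 0 := by
      rw [show ((i : Int) + d) = ((i + d.toNat : Nat) : Int) by omega]
      exact PySem.List.pyGetD_natCast a _ 0
    have e4 : gAt a ((j : Int) + d) = a.getD (j + d.toNat) 0 := by
      rw [show ((j : Int) + d) = ((j + d.toNat : Nat) : Int) by omega]
      exact PySem.List.pyGetD_natCast a _ 0
    simp only [keyAt, e1, e2, e3, e4, Prod.mk.injEq]
    constructor
    · ring
    · omega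
  · rw [Bool.not_eq_true] at hB
    rw [hB]
    rw [← Bool.not_eq_true] at hB ⊢
    intro hA
    apply hB
    rw [isCostas_iff] at hA
    rw [isCostas_alt_iff]
    intro i1 i2 j1 j2 h0 h12 h2n hj1 hj1n hj2 hj2n heq
    have hfst : j1 - i1 = j2 - i2 := congrArg Prod.fst heq
    have hsnd : gAt a j1 - gAt a i1 = gAt a j2 - gAt a i2 := congrArg Prod.snd heq
    set d : Int := j1 - i1 with hd
    have h1d : 1 ≤ d := by omega
    have h2d : d < (a.length : Int) - 1 := by omega
    have := hA d h1d h2d i1.toNat i2.toNat (by omega) (by omega)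
    apply this
    have e1 : a.getD i1.toNat 0 = gAt a i1 := by
      rw [gAt, PySem.List.pyGetD_of_nonneg a 0 (by omega)]
    have e2 : a.getD i2.toNat 0 = gAt a i2 := by
      rw [gAt, PySem.List.pyGetD_of_nonneg a 0 (by omega)]
    have e3 : a.getD (i1.toNat + d.toNat) 0 = gAt a j1 := by
      rw [gAt, PySem.List.pyGetD_of_nonneg a 0 (by omega)]
      congr 1
      omega
    have e4 : a.getD (i2.toNat + d.toNat) 0 = gAt a j2 := by
      rw [gAt, PySem.List.pyGetD_of_nonneg a 0 (by omega)]
      congr 1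
      omega
    rw [e1, e2, e3, e4]
    omega

-- ===== VERDICT (by name: the statement is the Claim_ definition above) =====
theorem isCostas_spec : Claim_equal_isCostas := by
  intro a _
  unfold Spec_isCostas
  exact conditions_agree a
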